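-- pv_equiv track=rewrite | github.com/cnuland/hello-chris-rl-zelda | train_visual.py | translate_llm_to_strategic_action
-- ===== SOURCE A (Python) =====
-- from typing import Dict, Tuple
--
-- def translate_llm_to_strategic_action(llm_guidance: Dict[str, str], action_space_size: int) -> Tuple[int, int]:
--     """Translate LLM guidance into strategic game actions.
--
--     Args:
--         llm_guidance: LLM response with action and reasoning
--         action_space_size: Size of action space
--
--     Returns:
--         Tuple of (action_id, steps_to_execute)
--     """
--     action_type = llm_guidance.get("action", "").upper()
--     reasoning = llm_guidance.get("reasoning", "").lower()
--
--     # 🎯 STRATEGIC MACRO TRANSLATION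
--     if "COMBAT_SWEEP" in action_type or "ATTACK" in action_type or "ENEMY" in reasoning:
--         # Sword attack (A button) with movement pattern
--         return 4, 15  # A button for 15 steps
--
--     elif "CUT_GRASS" in action_type or "grass" in reasoning:
--         # Systematic grass cutting (A button with movement)
--         return 4, 20  # A button for 20 steps
--
--     elif "SEARCH_ITEMS" in action_type or "item" in reasoning:
--         # Item searching (B button interaction)
--         return 5, 10  # B button for 10 steps
--
--     elif "ENEMY_HUNT" in action_type or "hunt" in reasoning:
--         # Aggressive enemy seeking (A button + movement)
--         return 4, 25  # A button for 25 steps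
--
--     elif "ENVIRONMENTAL_SEARCH" in action_type or "environment" in reasoning:
--         # Environment interaction (B button)
--         return 5, 15  # B button for 15 steps
--
--     elif "ROOM_CLEARING" in action_type or "clear" in reasoning:
--         # Comprehensive room clearing (A button)
--         return 4, 30  # A button for 30 steps
--
--     elif "EXPLORE" in action_type or "explore" in reasoning:
--         # Directional movement based on reasoning
--         if any(direction in reasoning for direction in ["up", "north"]):
--             return 0, 8  # UP for 8 steps
--         elif any(direction in reasoning for direction in ["down", "south"]):
--             return 1, 8  # DOWN for 8 steps
--         elif any(direction in reasoning for direction in ["left", "west"]):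
--             return 2, 8  # LEFT for 8 steps
--         elif any(direction in reasoning for direction in ["right", "east"]):
--             return 3, 8  # RIGHT for 8 steps
--         else:
--             return 0, 8  # Default UP
--
--     elif "TALK" in action_type or "npc" in reasoning:
--         # NPC interaction (A button)
--         return 4, 5  # A button for 5 steps
--
--     else:
--         # Default strategic exploration
--         return intelligent_exploration_action(0, action_space_size), 8
--
-- def intelligent_exploration_action(step: int, action_space_size: int) -> int:
--     """Intelligent exploration instead of pure random actions.
--
--     Args:
--         step: Current step number
--         action_space_size: Size of action space
--
--     Returns:
--         Strategic action ID
--     """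
--     # Cycle through exploration patterns instead of pure randomness
--     cycle = step % 40  # 40-step cycles
--
--     if cycle < 8:
--         return 0  # UP - explore north
--     elif cycle < 16:
--         return 3  # RIGHT - explore east
--     elif cycle < 24:
--         return 1  # DOWN - explore south
--     elif cycle < 32:
--         return 2  # LEFT - explore west
--     elif cycle < 36:
--         return 4  # A button - attack/interact
--     else:
--         return 5  # B button - secondary interact
-- ===== SOURCE B (Python) =====
-- # Exhaustive-match rewrite: instead of A's short-circuiting if-elif cascade, B scans
-- # EVERY keyword, collects the priorities of all that occur, aggregates with min(),
-- # and dispatches the winning priority through a result table (directions likewise).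
-- # B uses the evidently intended lowercase "enemy" where A's uppercase "ENEMY" check
-- # against a lowercased string is dead code.
--
-- _KEYWORDS = [
--     # (field, keyword, priority): field 0 = action_type, field 1 = reasoning
--     (0, "COMBAT_SWEEP", 0), (0, "ATTACK", 0), (1, "enemy", 0),
--     (0, "CUT_GRASS", 1), (1, "grass", 1),
--     (0, "SEARCH_ITEMS", 2), (1, "item", 2),
--     (0, "ENEMY_HUNT", 3), (1, "hunt", 3),
--     (0, "ENVIRONMENTAL_SEARCH", 4), (1, "environment", 4),
--     (0, "ROOM_CLEARING", 5), (1, "clear", 5),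
--     (0, "EXPLORE", 6), (1, "explore", 6),
--     (0, "TALK", 7), (1, "npc", 7),
-- ]
--
-- _RESULTS = {0: (4, 15), 1: (4, 20), 2: (5, 10), 3: (4, 25),
--             4: (5, 15), 5: (4, 30), 7: (4, 5), 8: (0, 8)}
--
-- _DIR_KEYWORDS = [("up", 0), ("north", 0), ("down", 1), ("south", 1),
--                  ("left", 2), ("west", 2), ("right", 3), ("east", 3)]
--
-- def translate_llm_to_strategic_action(llm_guidance, action_space_size):
--     texts = (llm_guidance.get("action", "").upper(),
--              llm_guidance.get("reasoning", "").lower())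
--     rank = min((p for f, kw, p in _KEYWORDS if kw in texts[f]), default=8)
--     if rank != 6:
--         return _RESULTS[rank]
--     # EXPLORE: direction of highest priority occurring in reasoning, default UP
--     return min((p for kw, p in _DIR_KEYWORDS if kw in texts[1]), default=0), 8
-- ===== Notes on version B (the rewrite author's own statement) =====
-- stated objective: alternative
-- what changed: Replaces A's short-circuiting if-elif cascade by an exhaustive scan that tests every keyword, collects the priorities of all matches, aggregates them with min(), and dispatches the winning priority through a result table (directions handled the same way).
-- intended difference: On inputs whose reasoning contains "enemy" but whose action matches neither COMBAT_SWEEP nor ATTACK, A's check '"ENEMY" in reasoning' tests an uppercase keyword against a lowercased string so it never fires and A falls through to a later rule (e.g. the (0, 8) default), while B returns the evidently intended combat result (4, 15). — e.g. on translate_llm_to_strategic_action([("reasoning", "enemy ahead")], 0): A returns (0, 8), B returns (4, 15)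
import Mathlib
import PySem

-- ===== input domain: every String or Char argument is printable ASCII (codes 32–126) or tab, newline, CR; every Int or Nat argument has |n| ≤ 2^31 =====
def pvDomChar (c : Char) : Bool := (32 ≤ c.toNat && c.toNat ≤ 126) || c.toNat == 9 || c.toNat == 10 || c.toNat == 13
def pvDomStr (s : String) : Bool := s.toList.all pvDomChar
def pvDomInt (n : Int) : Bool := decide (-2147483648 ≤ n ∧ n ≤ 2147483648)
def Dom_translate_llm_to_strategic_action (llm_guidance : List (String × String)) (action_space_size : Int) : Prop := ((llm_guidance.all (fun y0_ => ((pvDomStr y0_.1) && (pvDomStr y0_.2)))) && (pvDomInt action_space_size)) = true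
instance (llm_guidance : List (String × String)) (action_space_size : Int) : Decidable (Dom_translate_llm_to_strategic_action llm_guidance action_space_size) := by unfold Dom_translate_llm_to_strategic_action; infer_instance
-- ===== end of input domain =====

-- B replaces A's short-circuiting if-elif cascade by an exhaustive keyword scan aggregated with
-- min-priority and a table dispatch (alternative); B also uses the evidently intended lowercase
-- "enemy" reasoning keyword where A's "ENEMY" check is dead code.

-- ===== PORT A =====
def intelligent_exploration_action (step : Int) (action_space_size : Int) : Int :=
  let cycle := PySem.Int.mod step 40
  if cycle < 8 then 0
  else if cycle < 16 then 3
  else if cycle < 24 then 1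
  else if cycle < 32 then 2
  else if cycle < 36 then 4
  else 5

def translate_llm_to_strategic_action (llm_guidance : List (String × String)) (action_space_size : Int) : Int × Int :=
  let action_type := PySem.Str.upper (PySem.Dict.getD (PySem.Dict.mk llm_guidance) "action" "")
  let reasoning := PySem.Str.lower (PySem.Dict.getD (PySem.Dict.mk llm_guidance) "reasoning" "")
  if PySem.Str.isIn "COMBAT_SWEEP" action_type || PySem.Str.isIn "ATTACK" action_type || PySem.Str.isIn "ENEMY" reasoning then (4, 15)
  else if PySem.Str.isIn "CUT_GRASS" action_type || PySem.Str.isIn "grass" reasoning then (4, 20)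
  else if PySem.Str.isIn "SEARCH_ITEMS" action_type || PySem.Str.isIn "item" reasoning then (5, 10)
  else if PySem.Str.isIn "ENEMY_HUNT" action_type || PySem.Str.isIn "hunt" reasoning then (4, 25)
  else if PySem.Str.isIn "ENVIRONMENTAL_SEARCH" action_type || PySem.Str.isIn "environment" reasoning then (5, 15)
  else if PySem.Str.isIn "ROOM_CLEARING" action_type || PySem.Str.isIn "clear" reasoning then (4, 30)
  else if PySem.Str.isIn "EXPLORE" action_type || PySem.Str.isIn "explore" reasoning then
    (if (["up", "north"] : List String).any (fun d => PySem.Str.isIn d reasoning) then (0, 8)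
     else if (["down", "south"] : List String).any (fun d => PySem.Str.isIn d reasoning) then (1, 8)
     else if (["left", "west"] : List String).any (fun d => PySem.Str.isIn d reasoning) then (2, 8)
     else if (["right", "east"] : List String).any (fun d => PySem.Str.isIn d reasoning) then (3, 8)
     else (0, 8))
  else if PySem.Str.isIn "TALK" action_type || PySem.Str.isIn "npc" reasoning then (4, 5)
  else (intelligent_exploration_action 0 action_space_size, 8)

-- ===== PORT B =====
-- every keyword with its field (0 = action_type, 1 = reasoning) and priority
def pvKeywords : List (Int × String × Int) :=
  [ (0, "COMBAT_SWEEP", 0), (0, "ATTACK", 0), (1, "enemy", 0),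
    (0, "CUT_GRASS", 1), (1, "grass", 1),
    (0, "SEARCH_ITEMS", 2), (1, "item", 2),
    (0, "ENEMY_HUNT", 3), (1, "hunt", 3),
    (0, "ENVIRONMENTAL_SEARCH", 4), (1, "environment", 4),
    (0, "ROOM_CLEARING", 5), (1, "clear", 5),
    (0, "EXPLORE", 6), (1, "explore", 6),
    (0, "TALK", 7), (1, "npc", 7) ]

def pvResults : List (Int × (Int × Int)) :=
  [ (0, (4, 15)), (1, (4, 20)), (2, (5, 10)), (3, (4, 25)),
    (4, (5, 15)), (5, (4, 30)), (7, (4, 5)), (8, (0, 8)) ]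

def pvDirKeywords : List (String × Int) :=
  [ ("up", 0), ("north", 0), ("down", 1), ("south", 1),
    ("left", 2), ("west", 2), ("right", 3), ("east", 3) ]

def translate_llm_to_strategic_action_alt (llm_guidance : List (String × String)) (action_space_size : Int) : Int × Int :=
  let action_type := PySem.Str.upper (PySem.Dict.getD (PySem.Dict.mk llm_guidance) "action" "")
  let reasoning := PySem.Str.lower (PySem.Dict.getD (PySem.Dict.mk llm_guidance) "reasoning" "")
  -- rank = min(p for (f, kw, p) in _KEYWORDS if kw in texts[f]) with default 8
  let rank := (PySem.List.min?
      (pvKeywords.filterMap (fun t =>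
        if PySem.Str.isIn t.2.1 (if t.1 == 0 then action_type else reasoning) then some t.2.2 else none))
      (fun x => x)).getD 8
  if rank != 6 then
    -- _RESULTS[rank]; rank is always a key here, so the getD default is never used
    PySem.Dict.getD (PySem.Dict.mk pvResults) rank (0, 0)
  else
    ((PySem.List.min?
        (pvDirKeywords.filterMap (fun t =>
          if PySem.Str.isIn t.1 reasoning then some t.2 else none))
        (fun x => x)).getD 0, 8)

-- ===== PRECONDITION & SPEC =====
-- helpers for stating D_ independently of the ports: case-folding on char codes and
-- first-match field lookup in the guidance association list
def pvUpperc (c : Char) : Char := if 97 ≤ c.toNat ∧ c.toNat ≤ 122 then Char.ofNat (c.toNat - 32) else c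
def pvLowerc (c : Char) : Char := if 65 ≤ c.toNat ∧ c.toNat ≤ 90 then Char.ofNat (c.toNat + 32) else c
def pvField (g : List (String × String)) (k : String) : String := (List.lookup k g).getD ""

-- On inputs whose reasoning contains "enemy" (case-insensitively) but whose action matches neither
-- "COMBAT_SWEEP" nor "ATTACK", A's dead check `"ENEMY" in reasoning` (uppercase keyword tested
-- against a lowercased string) never fires, so A falls through to a later rule, while B returns the
-- evidently intended (4, 15).
def D_translate_llm_to_strategic_action (llm_guidance : List (String × String)) (action_space_size : Int) : Prop :=
  ¬ ("COMBAT_SWEEP".toList <:+: (pvField llm_guidance "action").toList.map pvUpperc) ∧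
  ¬ ("ATTACK".toList <:+: (pvField llm_guidance "action").toList.map pvUpperc) ∧
  ("enemy".toList <:+: (pvField llm_guidance "reasoning").toList.map pvLowerc)
instance (llm_guidance : List (String × String)) (action_space_size : Int) : Decidable (D_translate_llm_to_strategic_action llm_guidance action_space_size) := by unfold D_translate_llm_to_strategic_action; infer_instance

def Spec_translate_llm_to_strategic_action (llm_guidance : List (String × String)) (action_space_size : Int) (out : Int × Int) : Prop := ¬ D_translate_llm_to_strategic_action llm_guidance action_space_size → out = translate_llm_to_strategic_action_alt llm_guidance action_space_size
instance (llm_guidance : List (String × String)) (action_space_size : Int) (out : Int × Int) : Decidable (Spec_translate_llm_to_strategic_action llm_guidance action_space_size out) := by unfold Spec_translate_llm_to_strategic_action; infer_instance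

def pvDiffWitness_translate_llm_to_strategic_action : (List (String × String)) × Int := ([("reasoning", "enemy ahead")], 0)
def pvDiffWitnessOut_translate_llm_to_strategic_action : (Int × Int) × (Int × Int) := ((0, 8), (4, 15))

-- ===== CLAIM (what is proved, stated in full; the proofs are below) =====
def Claim_unchanged_translate_llm_to_strategic_action : Prop := ∀ (llm_guidance : List (String × String)) (action_space_size : Int), Dom_translate_llm_to_strategic_action llm_guidance action_space_size → Spec_translate_llm_to_strategic_action llm_guidance action_space_size (translate_llm_to_strategic_action llm_guidance action_space_size)
def Claim_changed_translate_llm_to_strategic_action : Prop := Dom_translate_llm_to_strategic_action (pvDiffWitness_translate_llm_to_strategic_action.1) (pvDiffWitness_translate_llm_to_strategic_action.2) ∧ D_translate_llm_to_strategic_action (pvDiffWitness_translate_llm_to_strategic_action.1) (pvDiffWitness_translate_llm_to_strategic_action.2) ∧ translate_llm_to_strategic_action (pvDiffWitness_translate_llm_to_strategic_action.1) (pvDiffWitness_translate_llm_to_strategic_action.2) = pvDiffWitnessOut_translate_llm_to_strategic_action.1 ∧ translate_llm_to_strategic_action_alt (pvDiffWitness_translate_llm_to_strategic_action.1) (pvDiffWitness_translate_llm_to_strategic_action.2)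 = pvDiffWitnessOut_translate_llm_to_strategic_action.2 ∧ pvDiffWitnessOut_translate_llm_to_strategic_action.1 ≠ pvDiffWitnessOut_translate_llm_to_strategic_action.2
def Claim_exact_translate_llm_to_strategic_action : Prop := ∀ (llm_guidance : List (String × String)) (action_space_size : Int), Dom_translate_llm_to_strategic_action llm_guidance action_space_size → D_translate_llm_to_strategic_action llm_guidance action_space_size → translate_llm_to_strategic_action llm_guidance action_space_size ≠ translate_llm_to_strategic_action_alt llm_guidance action_space_size

-- ===== LEMMAS AND PROOFS =====

theorem pvCharLe (a c : Char) : (a ≤ c) ↔ a.toNat ≤ c.toNat := by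
  rw [Char.le_def, UInt32.le_iff_toNat_le]
  rfl

theorem pvUpperc_eq : pvUpperc = PySem.Chars.upperChar := by
  funext c
  unfold pvUpperc PySem.Chars.upperChar PySem.Chars.islower
  have h : (97 ≤ c.toNat ∧ c.toNat ≤ 122) ↔ ('a' ≤ c ∧ c ≤ 'z') := by
    rw [pvCharLe, pvCharLe]
    constructor <;> (intro ⟨x, y⟩; exact ⟨x, y⟩)
  simp only [Bool.and_eq_true, decide_eq_true_eq]
  rw [if_congr h rfl rfl]

theorem pvLowerc_eq : pvLowerc = PySem.Chars.lowerChar := by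
  funext c
  unfold pvLowerc PySem.Chars.lowerChar PySem.Chars.isupper
  have h : (65 ≤ c.toNat ∧ c.toNat ≤ 90) ↔ ('A' ≤ c ∧ c ≤ 'Z') := by
    rw [pvCharLe, pvCharLe]
    constructor <;> (intro ⟨x, y⟩; exact ⟨x, y⟩)
  simp only [Bool.and_eq_true, decide_eq_true_eq]
  rw [if_congr h rfl rfl]

theorem pvField_eq (g : List (String × String)) (k : String) :
    pvField g k = PySem.Dict.getD (PySem.Dict.mk g) k "" := by
  unfold pvField PySem.Dict.getD
  congr 1
  induction g with
  | nil => rfl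
  | cons p rest ih =>
    obtain ⟨a, b⟩ := p
    rw [PySem.Dict.get?_mk_cons, List.lookup_cons]
    by_cases h : (a == k) = true
    · rw [if_pos h]
      have h' : (k == a) = true := by rw [BEq.comm]; exact h
      simp [h']
    · rw [if_neg h]
      have h' : (k == a) = false := by rw [BEq.comm]; exact Bool.eq_false_iff.mpr h
      simp [h', ih]

theorem pvIsInUpper (sub s : String) :
    PySem.Str.isIn sub (PySem.Str.upper s) = true ↔ sub.toList <:+: s.toList.map pvUpperc := by
  rw [PySem.Str.isIn_eq, PySem.Str.toList_upper,
    show s.toList.map pvUpperc = PySem.Chars.upper s.toList from by rw [pvUpperc_eq]; rfl]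
  exact PySem.Chars.isIn_iff_infix _ _

theorem pvIsInLower (sub s : String) :
    PySem.Str.isIn sub (PySem.Str.lower s) = true ↔ sub.toList <:+: s.toList.map pvLowerc := by
  rw [PySem.Str.isIn_eq, PySem.Str.toList_lower,
    show s.toList.map pvLowerc = PySem.Chars.lower s.toList from by rw [pvLowerc_eq]; rfl]
  exact PySem.Chars.isIn_iff_infix _ _

-- "ENEMY" can never occur in a lowercased string: lowerChar never outputs an uppercase letter.
theorem pvE_not_lower (s : List Char) : PySem.Chars.isIn "ENEMY".toList (PySem.Chars.lower s) = false := by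
  rw [PySem.Chars.isIn_eq_false_iff]
  intro h
  have hE : 'E' ∈ PySem.Chars.lower s := h.subset (by decide)
  obtain ⟨x, hx, hmap⟩ := List.mem_map.mp hE
  unfold PySem.Chars.lowerChar at hmap
  split at hmap
  · next hup =>
    have hb : 65 ≤ x.toNat ∧ x.toNat ≤ 90 := by
      unfold PySem.Chars.isupper at hup
      simp only [Bool.and_eq_true, decide_eq_true_eq, Char.le_def] at hup
      exact hup
    have hv : Nat.isValidChar (x.toNat + 32) := by left; omega
    have h2 := congrArg Char.toNat hmap
    rw [Char.toNat_ofNat, if_pos hv] at h2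
    have : ('E').toNat = 69 := by decide
    omega
  · next hup =>
    subst hmap
    exact hup (by decide)

theorem pvE_not_lower' (s : String) : PySem.Str.isIn "ENEMY" (PySem.Str.lower s) = false := by
  have := pvE_not_lower s.toList
  simpa using this

-- first priority whose flag is set (what a min over a sorted selection computes)
def pvFirst (ps : List (Bool × Int)) (d : Int) : Int :=
  match ps with
  | [] => d
  | p :: rest => if p.1 then p.2 else pvFirst rest d

theorem pvFoldlMin (v : Int) (l : List Int) (h : ∀ x ∈ l, v ≤ x) : l.foldl min v = v := by
  induction l generalizing v with
  | nil => rfl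
  | cons x t ih =>
    have hv : min v x = v := min_eq_left (h x (by simp))
    simp only [List.foldl_cons, hv]
    exact ih v (fun y hy => h y (by simp [hy]))

-- min over the priorities of the set flags of a sorted flag list = first set flag's priority
theorem pvMinSel (ps : List (Bool × Int)) (d : Int)
    (hs : ps.Pairwise (fun p q => p.2 ≤ q.2)) :
    ((PySem.List.min? (ps.filterMap (fun p => if p.1 then some p.2 else none)) (fun x => x)).getD d)
      = pvFirst ps d := by
  induction ps with
  | nil => rfl
  | cons p rest ih =>
    obtain ⟨b, v⟩ := p
    rcases List.pairwise_cons.mp hs with ⟨hhead, htail⟩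
    cases b with
    | false => simpa [pvFirst] using ih htail
    | true =>
      simp only [List.filterMap_cons, pvFirst, if_true]
      rw [PySem.List.min?_id_cons, Option.getD_some]
      exact pvFoldlMin v _ (by
        intro x hx
        obtain ⟨q, hq, hqx⟩ := List.mem_filterMap.mp hx
        split at hqx
        · cases hqx; exact hhead q hq
        · cases hqx)

theorem pvKwSorted : pvKeywords.Pairwise (fun p q => p.2.2 ≤ q.2.2) := by decide
theorem pvDirSorted : pvDirKeywords.Pairwise (fun p q => p.2 ≤ q.2) := by decide

theorem pvAltRank (a r : String) :
    ((PySem.List.min? (pvKeywords.filterMap (fun t =>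
        if PySem.Str.isIn t.2.1 (if t.1 == 0 then a else r) then some t.2.2 else none))
      (fun x => x)).getD 8)
    = pvFirst (pvKeywords.map (fun t => (PySem.Str.isIn t.2.1 (if t.1 == 0 then a else r), t.2.2))) 8 := by
  rw [← pvMinSel _ 8 (by rw [List.pairwise_map]; exact pvKwSorted), List.filterMap_map]; rfl

theorem pvAltDir (r : String) :
    ((PySem.List.min? (pvDirKeywords.filterMap (fun t =>
        if PySem.Str.isIn t.1 r then some t.2 else none))
      (fun x => x)).getD 0)
    = pvFirst (pvDirKeywords.map (fun t => (PySem.Str.isIn t.1 r, t.2))) 0 := by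
  rw [← pvMinSel _ 0 (by rw [List.pairwise_map]; exact pvDirSorted), List.filterMap_map]; rfl

theorem pvRes0 : PySem.Dict.getD (PySem.Dict.mk pvResults) (0 : Int) ((0:Int),(0:Int)) = (4, 15) := by decide
theorem pvIE (n : Int) : intelligent_exploration_action 0 n = 0 := rfl

theorem pvDirCase (r : String) :
    (if (PySem.Str.isIn "up" r || PySem.Str.isIn "north" r) = true then ((0:Int), (8:Int))
     else if (PySem.Str.isIn "down" r || PySem.Str.isIn "south" r) = true then (1, 8)
     else if (PySem.Str.isIn "left" r || PySem.Str.isIn "west" r) = true then (2, 8)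
     else if (PySem.Str.isIn "right" r || PySem.Str.isIn "east" r) = true then (3, 8)
     else (0, 8))
    = ((if PySem.Str.isIn "up" r = true then (0:Int)
        else if PySem.Str.isIn "north" r = true then 0
        else if PySem.Str.isIn "down" r = true then 1
        else if PySem.Str.isIn "south" r = true then 1
        else if PySem.Str.isIn "left" r = true then 2
        else if PySem.Str.isIn "west" r = true then 2
        else if PySem.Str.isIn "right" r = true then 3
        else if PySem.Str.isIn "east" r = true then 3
        else 0), 8) := by
  by_cases d0 : PySem.Str.isIn "up" r = true
  · simp only [d0, Bool.true_or, Bool.or_true, Bool.false_or, Bool.or_false, Bool.false_eq_true, if_false, reduceIte]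
  simp only [Bool.not_eq_true] at d0
  by_cases d1 : PySem.Str.isIn "north" r = true
  · simp only [d0, d1, Bool.true_or, Bool.or_true, Bool.false_or, Bool.or_false, Bool.false_eq_true, if_false, reduceIte]
  simp only [Bool.not_eq_true] at d1
  by_cases d2 : PySem.Str.isIn "down" r = true
  · simp only [d0, d1, d2, Bool.true_or, Bool.or_true, Bool.false_or, Bool.or_false, Bool.false_eq_true, if_false, reduceIte]
  simp only [Bool.not_eq_true] at d2
  by_cases d3 : PySem.Str.isIn "south" r = true
  · simp only [d0, d1, d2, d3, Bool.true_or, Bool.or_true, Bool.false_or, Bool.or_false, Bool.false_eq_true, if_false, reduceIte]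
  simp only [Bool.not_eq_true] at d3
  by_cases d4 : PySem.Str.isIn "left" r = true
  · simp only [d0, d1, d2, d3, d4, Bool.true_or, Bool.or_true, Bool.false_or, Bool.or_false, Bool.false_eq_true, if_false, reduceIte]
  simp only [Bool.not_eq_true] at d4
  by_cases d5 : PySem.Str.isIn "west" r = true
  · simp only [d0, d1, d2, d3, d4, d5, Bool.true_or, Bool.or_true, Bool.false_or, Bool.or_false, Bool.false_eq_true, if_false, reduceIte]
  simp only [Bool.not_eq_true] at d5
  by_cases d6 : PySem.Str.isIn "right" r = true
  · simp only [d0, d1, d2, d3, d4, d5, d6, Bool.true_or, Bool.or_true, Bool.false_or, Bool.or_false, Bool.false_eq_true, if_false, reduceIte]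
  simp only [Bool.not_eq_true] at d6
  by_cases d7 : PySem.Str.isIn "east" r = true
  · simp only [d0, d1, d2, d3, d4, d5, d6, d7, Bool.true_or, Bool.or_true, Bool.false_or, Bool.or_false, Bool.false_eq_true, if_false, reduceIte]
  simp only [Bool.not_eq_true] at d7
  simp only [d0, d1, d2, d3, d4, d5, d6, d7, Bool.true_or, Bool.or_true, Bool.false_or, Bool.or_false, Bool.false_eq_true, if_false, reduceIte]

-- ===== VERDICT (by name: the statement is the Claim_ definition above) =====
theorem translate_llm_to_strategic_action_spec : Claim_unchanged_translate_llm_to_strategic_action := by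
  intro g n _
  unfold Spec_translate_llm_to_strategic_action
  intro hD
  unfold D_translate_llm_to_strategic_action at hD
  have e1 : PySem.Str.isIn "COMBAT_SWEEP" (PySem.Str.upper (PySem.Dict.getD (PySem.Dict.mk g) "action" "")) = true ↔ "COMBAT_SWEEP".toList <:+: (pvField g "action").toList.map pvUpperc := by
    rw [pvField_eq]; exact pvIsInUpper _ _
  have e2 : PySem.Str.isIn "ATTACK" (PySem.Str.upper (PySem.Dict.getD (PySem.Dict.mk g) "action" "")) = true ↔ "ATTACK".toList <:+: (pvField g "action").toList.map pvUpperc := by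
    rw [pvField_eq]; exact pvIsInUpper _ _
  have e3 : PySem.Str.isIn "enemy" (PySem.Str.lower (PySem.Dict.getD (PySem.Dict.mk g) "reasoning" "")) = true ↔ "enemy".toList <:+: (pvField g "reasoning").toList.map pvLowerc := by
    rw [pvField_eq]; exact pvIsInLower _ _
  have hD' : ¬ (PySem.Str.isIn "COMBAT_SWEEP" (PySem.Str.upper (PySem.Dict.getD (PySem.Dict.mk g) "action" "")) = false
      ∧ PySem.Str.isIn "ATTACK" (PySem.Str.upper (PySem.Dict.getD (PySem.Dict.mk g) "action" "")) = false
      ∧ PySem.Str.isIn "enemy" (PySem.Str.lower (PySem.Dict.getD (PySem.Dict.mk g) "reasoning" "")) = true) := by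
    rintro ⟨x1, x2, x3⟩
    apply hD
    refine ⟨?_, ?_, e3.mp x3⟩
    · intro i; have := e1.mpr i; rw [this] at x1; cases x1
    · intro i; have := e2.mpr i; rw [this] at x2; cases x2
  have hE := pvE_not_lower' (PySem.Dict.getD (PySem.Dict.mk g) "reasoning" "")
  simp only [translate_llm_to_strategic_action, translate_llm_to_strategic_action_alt]
  rw [pvAltRank, pvAltDir]
  generalize hgr : PySem.Str.lower (PySem.Dict.getD (PySem.Dict.mk g) "reasoning" "") = r at hD' hE ⊢
  generalize hga : PySem.Str.upper (PySem.Dict.getD (PySem.Dict.mk g) "action" "") = a at hD' ⊢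
  simp only [pvKeywords, pvDirKeywords, List.map_cons, List.map_nil, pvFirst, List.any_cons,
    List.any_nil, Bool.or_false, hE, show ((0 : Int) == 0) = true from rfl,
    show ((1 : Int) == 0) = false from rfl, Bool.false_eq_true, reduceIte]
  by_cases h1 : PySem.Str.isIn "COMBAT_SWEEP" a = true
  · simp only [h1, Bool.true_or, Bool.or_true, Bool.false_or, Bool.or_false, Bool.false_eq_true, reduceIte]
    rfl
  simp only [Bool.not_eq_true] at h1
  by_cases h2 : PySem.Str.isIn "ATTACK" a = true
  · simp only [h1, h2, Bool.true_or, Bool.or_true, Bool.false_or, Bool.or_false, Bool.false_eq_true, reduceIte]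
    rfl
  simp only [Bool.not_eq_true] at h2
  have he : PySem.Str.isIn "enemy" r = false := by
    rcases Bool.eq_false_or_eq_true (PySem.Str.isIn "enemy" r) with h | h
    · exact absurd ⟨h1, h2, h⟩ hD'
    · exact h
  by_cases h3 : PySem.Str.isIn "CUT_GRASS" a = true
  · simp only [h1, h2, he, h3, Bool.true_or, Bool.or_true, Bool.false_or, Bool.or_false, Bool.false_eq_true, reduceIte]
    rfl
  simp only [Bool.not_eq_true] at h3
  by_cases h4 : PySem.Str.isIn "grass" r = true
  · simp only [h1, h2, he, h3, h4, Bool.true_or, Bool.or_true, Bool.false_or, Bool.or_false, Bool.false_eq_true, reduceIte]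
    rfl
  simp only [Bool.not_eq_true] at h4
  by_cases h5 : PySem.Str.isIn "SEARCH_ITEMS" a = true
  · simp only [h1, h2, he, h3, h4, h5, Bool.true_or, Bool.or_true, Bool.false_or, Bool.or_false, Bool.false_eq_true, reduceIte]
    rfl
  simp only [Bool.not_eq_true] at h5
  by_cases h6 : PySem.Str.isIn "item" r = true
  · simp only [h1, h2, he, h3, h4, h5, h6, Bool.true_or, Bool.or_true, Bool.false_or, Bool.or_false, Bool.false_eq_true, reduceIte]
    rfl
  simp only [Bool.not_eq_true] at h6
  by_cases h7 : PySem.Str.isIn "ENEMY_HUNT" a = true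
  · simp only [h1, h2, he, h3, h4, h5, h6, h7, Bool.true_or, Bool.or_true, Bool.false_or, Bool.or_false, Bool.false_eq_true, reduceIte]
    rfl
  simp only [Bool.not_eq_true] at h7
  by_cases h8 : PySem.Str.isIn "hunt" r = true
  · simp only [h1, h2, he, h3, h4, h5, h6, h7, h8, Bool.true_or, Bool.or_true, Bool.false_or, Bool.or_false, Bool.false_eq_true, reduceIte]
    rfl
  simp only [Bool.not_eq_true] at h8
  by_cases h9 : PySem.Str.isIn "ENVIRONMENTAL_SEARCH" a = true
  · simp only [h1, h2, he, h3, h4, h5, h6, h7, h8, h9, Bool.true_or, Bool.or_true, Bool.false_or, Bool.or_false, Bool.false_eq_true, reduceIte]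
    rfl
  simp only [Bool.not_eq_true] at h9
  by_cases h10 : PySem.Str.isIn "environment" r = true
  · simp only [h1, h2, he, h3, h4, h5, h6, h7, h8, h9, h10, Bool.true_or, Bool.or_true, Bool.false_or, Bool.or_false, Bool.false_eq_true, reduceIte]
    rfl
  simp only [Bool.not_eq_true] at h10
  by_cases h11 : PySem.Str.isIn "ROOM_CLEARING" a = true
  · simp only [h1, h2, he, h3, h4, h5, h6, h7, h8, h9, h10, h11, Bool.true_or, Bool.or_true, Bool.false_or, Bool.or_false, Bool.false_eq_true, reduceIte]
    rfl
  simp only [Bool.not_eq_true] at h11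
  by_cases h12 : PySem.Str.isIn "clear" r = true
  · simp only [h1, h2, he, h3, h4, h5, h6, h7, h8, h9, h10, h11, h12, Bool.true_or, Bool.or_true, Bool.false_or, Bool.or_false, Bool.false_eq_true, reduceIte]
    rfl
  simp only [Bool.not_eq_true] at h12
  by_cases h13 : PySem.Str.isIn "EXPLORE" a = true
  · simp only [h1, h2, he, h3, h4, h5, h6, h7, h8, h9, h10, h11, h12, h13, Bool.true_or, Bool.or_true, Bool.false_or, Bool.or_false, Bool.false_eq_true, reduceIte]
    exact pvDirCase r
  simp only [Bool.not_eq_true] at h13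
  by_cases h14 : PySem.Str.isIn "explore" r = true
  · simp only [h1, h2, he, h3, h4, h5, h6, h7, h8, h9, h10, h11, h12, h13, h14, Bool.true_or, Bool.or_true, Bool.false_or, Bool.or_false, Bool.false_eq_true, reduceIte]
    exact pvDirCase r
  simp only [Bool.not_eq_true] at h14
  by_cases h15 : PySem.Str.isIn "TALK" a = true
  · simp only [h1, h2, he, h3, h4, h5, h6, h7, h8, h9, h10, h11, h12, h13, h14, h15, Bool.true_or, Bool.or_true, Bool.false_or, Bool.or_false, Bool.false_eq_true, reduceIte]
    rfl
  simp only [Bool.not_eq_true] at h15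
  by_cases h16 : PySem.Str.isIn "npc" r = true
  · simp only [h1, h2, he, h3, h4, h5, h6, h7, h8, h9, h10, h11, h12, h13, h14, h15, h16, Bool.true_or, Bool.or_true, Bool.false_or, Bool.or_false, Bool.false_eq_true, reduceIte]
    rfl
  simp only [Bool.not_eq_true] at h16
  simp only [h1, h2, he, h3, h4, h5, h6, h7, h8, h9, h10, h11, h12, h13, h14, h15, h16, Bool.true_or, Bool.or_true, Bool.false_or, Bool.or_false, Bool.false_eq_true, reduceIte]
  rfl

set_option maxHeartbeats 4000000 in
theorem translate_llm_to_strategic_action_changed : Claim_changed_translate_llm_to_strategic_action := by unfold Claim_changed_translate_llm_to_strategic_action; decide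

set_option maxHeartbeats 1000000 in
theorem translate_llm_to_strategic_action_tight : Claim_exact_translate_llm_to_strategic_action := by
  intro g n _ hD
  obtain ⟨dd1, dd2, dd3⟩ := hD
  have e1 : PySem.Str.isIn "COMBAT_SWEEP" (PySem.Str.upper (PySem.Dict.getD (PySem.Dict.mk g) "action" "")) = true ↔ "COMBAT_SWEEP".toList <:+: (pvField g "action").toList.map pvUpperc := by
    rw [pvField_eq]; exact pvIsInUpper _ _
  have e2 : PySem.Str.isIn "ATTACK" (PySem.Str.upper (PySem.Dict.getD (PySem.Dict.mk g) "action" "")) = true ↔ "ATTACK".toList <:+: (pvField g "action").toList.map pvUpperc := by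
    rw [pvField_eq]; exact pvIsInUpper _ _
  have e3 : PySem.Str.isIn "enemy" (PySem.Str.lower (PySem.Dict.getD (PySem.Dict.mk g) "reasoning" "")) = true ↔ "enemy".toList <:+: (pvField g "reasoning").toList.map pvLowerc := by
    rw [pvField_eq]; exact pvIsInLower _ _
  have b1 : PySem.Str.isIn "COMBAT_SWEEP" (PySem.Str.upper (PySem.Dict.getD (PySem.Dict.mk g) "action" "")) = false :=
    Bool.eq_false_iff.mpr (fun h => dd1 (e1.mp h))
  have b2 : PySem.Str.isIn "ATTACK" (PySem.Str.upper (PySem.Dict.getD (PySem.Dict.mk g) "action" "")) = false :=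
    Bool.eq_false_iff.mpr (fun h => dd2 (e2.mp h))
  have b3 : PySem.Str.isIn "enemy" (PySem.Str.lower (PySem.Dict.getD (PySem.Dict.mk g) "reasoning" "")) = true :=
    e3.mpr dd3
  have hE := pvE_not_lower' (PySem.Dict.getD (PySem.Dict.mk g) "reasoning" "")
  simp only [translate_llm_to_strategic_action, translate_llm_to_strategic_action_alt]
  rw [pvAltRank, pvAltDir]
  generalize hgr : PySem.Str.lower (PySem.Dict.getD (PySem.Dict.mk g) "reasoning" "") = r at b3 hE ⊢
  generalize hga : PySem.Str.upper (PySem.Dict.getD (PySem.Dict.mk g) "action" "") = a at b1 b2 ⊢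
  simp only [pvKeywords, pvDirKeywords, List.map_cons, List.map_nil, pvFirst, List.any_cons,
    List.any_nil, Bool.or_false, hE, b1, b2, b3, show ((0 : Int) == 0) = true from rfl,
    show ((1 : Int) == 0) = false from rfl, show ((0 : Int) != 6) = true from rfl,
    Bool.false_eq_true, Bool.false_or, Bool.true_or, Bool.or_true, reduceIte, pvRes0]
  split_ifs <;> simp [pvIE]
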